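-- pv_equiv track=rewrite | github.com/360ghar/social-ai-reply | app/services/product/relevance.py | intent_quality_score
-- ===== SOURCE A (Python) =====
-- def intent_quality_score(intent_hits: list[str]) -> int:
--     """Assign differentiated scores based on intent quality.
--
--     Recommendation and comparison intents are highest value for
--     engagement because the user is actively evaluating options.
--     Direct questions are moderate. Generic help-seeking is lower.
--
--     Returns a bonus score (0–12) based on the best intent quality found.
--     """
--     quality = 0
--     for hit in intent_hits:
--         lowered = hit.lower()
--         # High-value: actively evaluating options
--         if any(term in lowered for term in [
--             "recommend", "recommendation", "alternative", "comparison",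
--             "compare", "versus", "best tool", "which tool", "what tool",
--         ]):
--             quality = max(quality, 12)
--         # Medium-value: direct question
--         elif "direct question" in lowered:
--             quality = max(quality, 6)
--         # Base: general help-seeking
--         elif any(term in lowered for term in [
--             "need help", "struggling", "looking for", "any advice",
--         ]):
--             quality = max(quality, 3)
--     return quality
-- ===== SOURCE B (Python) =====
-- HIGH_TERMS = [
--     "recommend", "recommendation", "alternative", "comparison",
--     "compare", "versus", "best tool", "which tool", "what tool",
-- ]
-- BASE_TERMS = ["need help", "struggling", "looking for", "any advice"]
--
--
-- def intent_quality_score(intent_hits: list[str]) -> int: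
--     """Priority-ordered short-circuit scan: return the score of the
--     highest-priority term class present in any hit."""
--     lowered = [h.lower() for h in intent_hits]
--     if any(term in h for h in lowered for term in HIGH_TERMS):
--         return 12
--     if any("direct question" in h for h in lowered):
--         return 6
--     if any(term in h for h in lowered for term in BASE_TERMS):
--         return 3
--     return 0
-- ===== Notes on version B (the rewrite author's own statement) =====
-- stated objective: simpler
-- what changed: Replaces the running-max accumulator over per-hit elif branches with three priority-ordered any-scans that return early (12, then 6, then 3, else 0), exploiting that category scores are strictly ordered.
import Mathlib
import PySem

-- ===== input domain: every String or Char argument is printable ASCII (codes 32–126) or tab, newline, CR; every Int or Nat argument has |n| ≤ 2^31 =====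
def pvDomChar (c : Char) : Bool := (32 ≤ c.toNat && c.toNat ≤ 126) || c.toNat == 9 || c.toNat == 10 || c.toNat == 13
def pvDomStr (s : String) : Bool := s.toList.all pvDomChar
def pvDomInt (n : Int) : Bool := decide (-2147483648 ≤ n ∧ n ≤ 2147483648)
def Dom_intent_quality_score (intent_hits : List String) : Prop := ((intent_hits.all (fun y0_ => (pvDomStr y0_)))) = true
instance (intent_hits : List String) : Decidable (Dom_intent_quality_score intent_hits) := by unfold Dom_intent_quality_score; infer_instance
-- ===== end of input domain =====

-- B replaces A's running-max accumulator with three priority-ordered any-scans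
-- returning early (simpler decomposition); same return value everywhere.

-- term lists (literal constants shared by both Python sources)
def highTerms : List String :=
  ["recommend", "recommendation", "alternative", "comparison",
   "compare", "versus", "best tool", "which tool", "what tool"]

def baseTerms : List String :=
  ["need help", "struggling", "looking for", "any advice"]

-- ===== PORT A =====
-- literal port of A: loop body as helper, fold over hits updating a running max
def qualityStep (quality : Int) (hit : String) : Int :=
  let lowered := PySem.Str.lower hit
  if highTerms.any (fun term => PySem.Str.isIn term lowered) then
    max quality 12
  else if PySem.Str.isIn "direct question" lowered then
    max quality 6
  else if baseTerms.any (fun term => PySem.Str.isIn term lowered) then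
    max quality 3
  else quality

def intent_quality_score (intent_hits : List String) : Int :=
  intent_hits.foldl qualityStep 0

-- ===== PORT B =====
-- literal port of B: lowercase once, then three priority-ordered any-scans
def intent_quality_score_alt (intent_hits : List String) : Int :=
  let lowered := intent_hits.map PySem.Str.lower
  if lowered.any (fun h => highTerms.any (fun term => PySem.Str.isIn term h)) then 12
  else if lowered.any (fun h => PySem.Str.isIn "direct question" h) then 6
  else if lowered.any (fun h => baseTerms.any (fun term => PySem.Str.isIn term h)) then 3
  else 0

-- ===== PRECONDITION & SPEC =====
def Spec_intent_quality_score (intent_hits : List String) (out : Int) : Prop := out = intent_quality_score_alt intent_hits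
instance (intent_hits : List String) (out : Int) : Decidable (Spec_intent_quality_score intent_hits out) := by unfold Spec_intent_quality_score; infer_instance

-- ===== CLAIM (what is proved, stated in full; the proofs are below) =====
def Claim_equal_intent_quality_score : Prop := ∀ (intent_hits : List String), Dom_intent_quality_score intent_hits → Spec_intent_quality_score intent_hits (intent_quality_score intent_hits)

-- ===== LEMMAS AND PROOFS =====

-- the three per-hit category tests (on the lowered hit)
def pHigh (h : String) : Bool := highTerms.any (fun term => PySem.Str.isIn term (PySem.Str.lower h))
def pMid (h : String) : Bool := PySem.Str.isIn "direct question" (PySem.Str.lower h)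
def pBase (h : String) : Bool := baseTerms.any (fun term => PySem.Str.isIn term (PySem.Str.lower h))

-- the priority cascade on the three booleans
def triScore (a b c : Bool) : Int :=
  if a then 12 else if b then 6 else if c then 3 else 0

lemma triScore_or : forall a b c a' b' c' : Bool,
    triScore (a || a') (b || b') (c || c') = max (triScore a b c) (triScore a' b' c') := by
  decide

lemma triScore_nonneg : forall a b c : Bool, 0 <= triScore a b c := by decide

lemma alt_eq_tri (xs : List String) :
    intent_quality_score_alt xs = triScore (xs.any pHigh) (xs.any pMid) (xs.any pBase) := by
  unfold intent_quality_score_alt triScore pHigh pMid pBase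
  simp only [List.any_map, Function.comp_def]

lemma step_eq (q : Int) (hit : String) (hq : 0 <= q) :
    qualityStep q hit = max q (triScore (pHigh hit) (pMid hit) (pBase hit)) := by
  simp only [qualityStep, triScore, pHigh, pMid, pBase]
  split_ifs <;> omega

lemma foldA_eq (t : List String) : forall q : Int, 0 <= q ->
    t.foldl qualityStep q = max q (intent_quality_score_alt t) := by
  induction t with
  | nil =>
    intro q hq
    rw [alt_eq_tri]
    simp [triScore]
    omega
  | cons h t ih =>
    intro q hq
    have h0 : 0 <= max q (triScore (pHigh h) (pMid h) (pBase h)) := le_trans hq (le_max_left _ _)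
    rw [List.foldl_cons, step_eq q h hq, ih _ h0, alt_eq_tri t, alt_eq_tri (h :: t)]
    simp only [List.any_cons, triScore_or]
    rw [max_assoc]

-- ===== VERDICT (by name: the statement is the Claim_ definition above) =====
theorem intent_quality_score_spec : Claim_equal_intent_quality_score := by
  intro intent_hits _
  unfold Spec_intent_quality_score intent_quality_score
  rw [foldA_eq intent_hits 0 le_rfl]
  rw [alt_eq_tri]
  have := triScore_nonneg (intent_hits.any pHigh) (intent_hits.any pMid) (intent_hits.any pBase)
  omega
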